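-- pv_equiv track=rewrite | github.com/vivekjindal24/ecg-tensor | scripts/unify_label_mapping.py | map_ptbxl_codes_to_class
-- ===== SOURCE A (Python) =====
-- from typing import Dict, List, Optional, Tuple
--
-- PTBXL_META: Dict[str, Dict[str, str]] = {}
--
-- def map_ptbxl_codes_to_class(codes: List[str]) -> str:
--     # Priority: MI > AF > BBB > NORM > OTHER
--     has_mi = False
--     has_af = False
--     has_bbb = False
--     has_norm = False
--     for c in codes:
--         meta = PTBXL_META.get(c, {})
--         diag_class = meta.get('diagnostic_class', '').upper()
--         diag_sub = meta.get('diagnostic_subclass', '').upper()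
--         desc = meta.get('description', '').upper()
--         rhythm_flag = str(meta.get('rhythm', '')).strip()
--         # MI
--         if diag_class == 'MI':
--             has_mi = True
--         # AF: check known AF codes or rhythm flag and description
--         if c.upper() in {'AF', 'AFIB', 'AFIB1', 'AFL', 'AFLUT'} or 'ATRIAL FIBRILLATION' in desc:
--             has_af = True
--         elif rhythm_flag in ('1', 'True', 'true') and ('AF' in c.upper() or 'FIBR' in desc):
--             has_af = True
--         # BBB: conduction disturbances; look for subclass BBB or common codes
--         if diag_class == 'CD' and ('BBB' in diag_sub or 'BBB' in desc or c.upper().endswith('BBB')):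
--             has_bbb = True
--         # NORM
--         if diag_class == 'NORM' or c.upper() == 'NORM':
--             has_norm = True
--     if has_mi:
--         return 'MI'
--     if has_af:
--         return 'AF'
--     if has_bbb:
--         return 'BBB'
--     if has_norm:
--         return 'NORM'
--     return 'OTHER'
-- ===== SOURCE B (Python) =====
-- from typing import Dict, List
--
-- PTBXL_META: Dict[str, Dict[str, str]] = {}
--
-- _AF_CODES = {'AF', 'AFIB', 'AFIB1', 'AFL', 'AFLUT'}
--
--
-- def _is_mi(c):
--     meta = PTBXL_META.get(c, {})
--     return meta.get('diagnostic_class', '').upper() == 'MI'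
--
--
-- def _is_af(c):
--     meta = PTBXL_META.get(c, {})
--     desc = meta.get('description', '').upper()
--     rhythm_flag = str(meta.get('rhythm', '')).strip()
--     return (c.upper() in _AF_CODES
--             or 'ATRIAL FIBRILLATION' in desc
--             or (rhythm_flag in ('1', 'True', 'true')
--                 and ('AF' in c.upper() or 'FIBR' in desc)))
--
--
-- def _is_bbb(c):
--     meta = PTBXL_META.get(c, {})
--     diag_sub = meta.get('diagnostic_subclass', '').upper()
--     desc = meta.get('description', '').upper()
--     return (meta.get('diagnostic_class', '').upper() == 'CD'
--             and ('BBB' in diag_sub or 'BBB' in desc or c.upper().endswith('BBB')))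
--
--
-- def _is_norm(c):
--     meta = PTBXL_META.get(c, {})
--     return meta.get('diagnostic_class', '').upper() == 'NORM' or c.upper() == 'NORM'
--
--
-- def map_ptbxl_codes_to_class(codes: List[str]) -> str:
--     # Priority ladder: MI > AF > BBB > NORM > OTHER, each a short-circuiting scan
--     if any(_is_mi(c) for c in codes):
--         return 'MI'
--     if any(_is_af(c) for c in codes):
--         return 'AF'
--     if any(_is_bbb(c) for c in codes):
--         return 'BBB'
--     if any(_is_norm(c) for c in codes):
--         return 'NORM'
--     return 'OTHER'
-- ===== Notes on version B (the rewrite author's own statement) =====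
-- stated objective: simpler
-- what changed: Replaces A's single flag-accumulating pass (four booleans updated per code, AF via if/elif) with four independent predicate helpers and a direct priority ladder of short-circuiting any() scans.
import Mathlib
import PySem

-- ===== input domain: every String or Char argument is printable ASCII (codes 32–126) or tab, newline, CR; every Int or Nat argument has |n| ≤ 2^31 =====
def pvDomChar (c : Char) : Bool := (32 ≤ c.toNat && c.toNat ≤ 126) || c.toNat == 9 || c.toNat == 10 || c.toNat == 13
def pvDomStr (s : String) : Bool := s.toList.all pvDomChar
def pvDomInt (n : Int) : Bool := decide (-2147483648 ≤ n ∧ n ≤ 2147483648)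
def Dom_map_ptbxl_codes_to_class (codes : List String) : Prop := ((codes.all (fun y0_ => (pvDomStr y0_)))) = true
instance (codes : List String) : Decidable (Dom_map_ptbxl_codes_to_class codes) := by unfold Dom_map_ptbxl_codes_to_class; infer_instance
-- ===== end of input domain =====

-- B replaces A's single flag-accumulating pass with four predicate helpers and a priority ladder of short-circuiting scans (simpler decomposition).



-- ===== PORT A =====
-- PTBXL_META is the empty dict in the module as given.
def PTBXL_META : PySem.Dict String (PySem.Dict String String) := PySem.Dict.empty

def pvAFCodes : PySem.Set String := PySem.Set.ofList ["AF", "AFIB", "AFIB1", "AFL", "AFLUT"]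

-- the body of A's for-loop, updating the four flags (has_mi, has_af, has_bbb, has_norm)
def pvAStep (s : Bool × Bool × Bool × Bool) (c : String) : Bool × Bool × Bool × Bool :=
  let (has_mi, has_af, has_bbb, has_norm) := s
  let pmeta := PTBXL_META.getD c PySem.Dict.empty
  let diag_class := PySem.Str.upper (pmeta.getD "diagnostic_class" "")
  let diag_sub := PySem.Str.upper (pmeta.getD "diagnostic_subclass" "")
  let desc := PySem.Str.upper (pmeta.getD "description" "")
  let rhythm_flag := PySem.Str.strip (pmeta.getD "rhythm" "")
  let has_mi := if diag_class == "MI" then true else has_mi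
  let has_af :=
    if PySem.Set.contains pvAFCodes (PySem.Str.upper c) || PySem.Str.isIn "ATRIAL FIBRILLATION" desc then true
    else if (rhythm_flag == "1" || rhythm_flag == "True" || rhythm_flag == "true")
            && (PySem.Str.isIn "AF" (PySem.Str.upper c) || PySem.Str.isIn "FIBR" desc) then true
    else has_af
  let has_bbb :=
    if diag_class == "CD"
       && (PySem.Str.isIn "BBB" diag_sub || PySem.Str.isIn "BBB" desc
           || PySem.Str.endswith (PySem.Str.upper c) "BBB") then true
    else has_bbb
  let has_norm := if diag_class == "NORM" || PySem.Str.upper c == "NORM" then true else has_norm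
  (has_mi, has_af, has_bbb, has_norm)

def map_ptbxl_codes_to_class (codes : List String) : String :=
  let flags := codes.foldl pvAStep (false, false, false, false)
  if flags.1 then "MI"
  else if flags.2.1 then "AF"
  else if flags.2.2.1 then "BBB"
  else if flags.2.2.2 then "NORM"
  else "OTHER"

-- ===== PORT B =====
-- B: four independent predicates + a priority ladder of short-circuiting scans (simpler decomposition)
def pvIsMI (c : String) : Bool :=
  let pmeta := PTBXL_META.getD c PySem.Dict.empty
  PySem.Str.upper (pmeta.getD "diagnostic_class" "") == "MI"

def pvIsAF (c : String) : Bool :=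
  let pmeta := PTBXL_META.getD c PySem.Dict.empty
  let desc := PySem.Str.upper (pmeta.getD "description" "")
  let rhythm_flag := PySem.Str.strip (pmeta.getD "rhythm" "")
  PySem.Set.contains pvAFCodes (PySem.Str.upper c)
    || PySem.Str.isIn "ATRIAL FIBRILLATION" desc
    || ((rhythm_flag == "1" || rhythm_flag == "True" || rhythm_flag == "true")
        && (PySem.Str.isIn "AF" (PySem.Str.upper c) || PySem.Str.isIn "FIBR" desc))

def pvIsBBB (c : String) : Bool :=
  let pmeta := PTBXL_META.getD c PySem.Dict.empty
  let diag_sub := PySem.Str.upper (pmeta.getD "diagnostic_subclass" "")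
  let desc := PySem.Str.upper (pmeta.getD "description" "")
  PySem.Str.upper (pmeta.getD "diagnostic_class" "") == "CD"
    && (PySem.Str.isIn "BBB" diag_sub || PySem.Str.isIn "BBB" desc
        || PySem.Str.endswith (PySem.Str.upper c) "BBB")

def pvIsNorm (c : String) : Bool :=
  let pmeta := PTBXL_META.getD c PySem.Dict.empty
  PySem.Str.upper (pmeta.getD "diagnostic_class" "") == "NORM" || PySem.Str.upper c == "NORM"

def map_ptbxl_codes_to_class_alt (codes : List String) : String :=
  if codes.any pvIsMI then "MI"
  else if codes.any pvIsAF then "AF"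
  else if codes.any pvIsBBB then "BBB"
  else if codes.any pvIsNorm then "NORM"
  else "OTHER"

-- ===== PRECONDITION & SPEC =====
def Spec_map_ptbxl_codes_to_class (codes : List String) (out : String) : Prop := out = map_ptbxl_codes_to_class_alt codes
instance (codes : List String) (out : String) : Decidable (Spec_map_ptbxl_codes_to_class codes out) := by unfold Spec_map_ptbxl_codes_to_class; infer_instance

-- ===== CLAIM (what is proved, stated in full; the proofs are below) =====
def Claim_equal_map_ptbxl_codes_to_class : Prop := ∀ (codes : List String), Dom_map_ptbxl_codes_to_class codes → Spec_map_ptbxl_codes_to_class codes (map_ptbxl_codes_to_class codes)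

-- ===== LEMMAS AND PROOFS =====

-- one loop step of A sets each flag to (old flag || B's predicate)
theorem pvAStep_eq (s : Bool × Bool × Bool × Bool) (c : String) :
    pvAStep s c = (s.1 || pvIsMI c, s.2.1 || pvIsAF c, s.2.2.1 || pvIsBBB c, s.2.2.2 || pvIsNorm c) := by
  obtain ⟨mi, af, bbb, nrm⟩ := s
  simp only [pvAStep, pvIsMI, pvIsAF, pvIsBBB, pvIsNorm, Bool.if_true_left, Bool.decide_eq_true]
  refine Prod.ext ?_ (Prod.ext ?_ (Prod.ext ?_ ?_)) <;> simp <;> ac_rfl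

theorem pvFoldl_flags (codes : List String) (s : Bool × Bool × Bool × Bool) :
    codes.foldl pvAStep s =
      (s.1 || codes.any pvIsMI, s.2.1 || codes.any pvIsAF,
       s.2.2.1 || codes.any pvIsBBB, s.2.2.2 || codes.any pvIsNorm) := by
  induction codes generalizing s with
  | nil => simp
  | cons c cs ih =>
      simp only [List.foldl_cons, List.any_cons, ih, pvAStep_eq, Bool.or_assoc]

-- ===== VERDICT (by name: the statement is the Claim_ definition above) =====
theorem map_ptbxl_codes_to_class_spec : Claim_equal_map_ptbxl_codes_to_class := by
  intro codes _
  show map_ptbxl_codes_to_class codes = map_ptbxl_codes_to_class_alt codes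
  simp only [map_ptbxl_codes_to_class, map_ptbxl_codes_to_class_alt, pvFoldl_flags, Bool.false_or]
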